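-- pv_equiv track=rewrite | github.com/LordGhostX/HashDB | jndb.py | encryptdb
-- ===== SOURCE A (Python) =====
-- def encpass(password):
-- 	password = str(password)
-- 	tot = 0
-- 	for p in range(len(password)):
-- 		tot += ord(password[p]) * p
-- 	tot += ord(password[0]) + ord(password[-1])
-- 	return tot % 256
--
-- def encryptdb(dbcontent, password):
-- 	values = [1, 1, 2, 3, 5, 8, 13, 21, 34, 55, 89, 144][::-1]
-- 	keys = list("<~,.?-}[@*|/")
-- 	dbcontent = dbcontent[::-1]
-- 	key = encpass(password)
-- 	current_count, index = 0, 1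
-- 	new_word = ""
-- 	for cur in dbcontent:
-- 		value = ord(cur) + key + (index % len(password))
-- 		index += 1
-- 		while(current_count < value):
-- 			for i in range(len(keys)):
-- 				if current_count + values[i] <= value:
-- 					current_count += values[i]
-- 					new_word += keys[i]
-- 		new_word += ":"
-- 		current_count = 0
-- 	return new_word
-- ===== SOURCE B (Python) =====
-- def encpass(password):
--     password = str(password)
--     tot = sum(i * ord(ch) for i, ch in enumerate(password))
--     tot += ord(password[0]) + ord(password[-1])
--     return tot % 256
--
-- def encryptdb(dbcontent, password):
--     values = [144, 89, 55, 34, 21, 13, 8, 5, 3, 2, 1, 1]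
--     keys = "<~,.?-}[@*|/"
--     pairs = list(zip(values, keys))
--     key = encpass(password)
--     n = len(password)
--     parts = []
--     for i, cur in enumerate(reversed(dbcontent)):
--         value = ord(cur) + key + ((i + 1) % n)
--         q, r = divmod(value, 376)
--         piece = keys * q
--         c = 0
--         for v, k in pairs:
--             if c + v <= r:
--                 c += v
--                 piece += k
--         parts.append(piece + ":")
--     return "".join(parts)
-- ===== Notes on version B (the rewrite author's own statement) =====
-- stated objective: faster
-- what changed: Per character, A repeats full greedy coin passes in a while loop (appending to one ever-growing string) until the count reaches the value; B computes q, r = divmod(value, 376) (376 = sum of the coin set), emits the whole key string q times by string repetition plus a single greedy remainder pass, and joins per-character pieces at the end, avoiding A's quadratic string concatenation.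
import Mathlib
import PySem

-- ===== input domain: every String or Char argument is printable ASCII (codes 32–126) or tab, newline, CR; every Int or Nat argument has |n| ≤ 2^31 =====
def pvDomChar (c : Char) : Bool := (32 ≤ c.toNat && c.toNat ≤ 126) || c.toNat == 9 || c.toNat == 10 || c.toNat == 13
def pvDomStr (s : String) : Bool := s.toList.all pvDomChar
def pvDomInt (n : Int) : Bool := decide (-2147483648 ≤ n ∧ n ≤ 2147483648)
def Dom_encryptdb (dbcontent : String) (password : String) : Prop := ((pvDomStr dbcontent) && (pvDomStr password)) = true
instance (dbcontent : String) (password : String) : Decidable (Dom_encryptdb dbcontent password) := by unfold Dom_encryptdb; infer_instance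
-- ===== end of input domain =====

-- B replaces A's repeated full greedy passes (and its ever-growing 'new_word +=' string) by divmod(value, 376):
-- one key-string repetition plus a single greedy remainder pass, joined at the end; objective: faster (measured).

-- ===== PORT A =====

-- neutral proof helper, also used by passA's termination lemma: one greedy pass over a coin/key list
def pvCoinFold (L : List (Int × Char)) (v : Int) (st : Int × List Char) : Int × List Char :=
  L.foldl (fun st p => if st.1 + p.1 ≤ v then (st.1 + p.1, st.2 ++ [p.2]) else st) st

def pvPairs : List (Int × Char) :=
  [(144,'<'),(89,'~'),(55,','),(34,'.'),(21,'?'),(13,'-'),(8,'}'),(5,'['),(3,'@'),(2,'*'),(1,'|'),(1,'/')]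

def pvAllKeys : List Char := ['<','~',',','.','?','-','}','[','@','*','|','/']

def valuesA : List Int := ([1, 1, 2, 3, 5, 8, 13, 21, 34, 55, 89, 144] : List Int).reverse  -- [::-1]

def keysA : List Char := "<~,.?-}[@*|/".toList  -- list("<~,.?-}[@*|/")

-- the body of A's while loop: 'for i in range(len(keys)): if current_count + values[i] <= value: …'
def passA (value current : Int) (word : List Char) : Int × List Char :=
  (PySem.List.pyRange 0 (keysA.length : Int) 1).foldl
    (fun st i =>
      if st.1 + PySem.List.pyGetD valuesA i 0 ≤ value then
        (st.1 + PySem.List.pyGetD valuesA i 0, st.2 ++ [PySem.List.pyGetD keysA i ' '])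
      else st)
    (current, word)

lemma passA_eq_coinFold (v c : Int) (s : List Char) : passA v c s = pvCoinFold pvPairs v (c, s) := rfl

-- a greedy pass depends only on (value - current_count); it appends to the word
lemma coinFold_shift (L : List (Int × Char)) : ∀ (v c : Int) (s : List Char),
    pvCoinFold L v (c, s)
      = (c + (pvCoinFold L (v - c) (0, [])).1, s ++ (pvCoinFold L (v - c) (0, [])).2) := by
  induction L with
  | nil => intro v c s; simp [pvCoinFold]
  | cons p L ih =>
    intro v c s
    obtain ⟨a, k⟩ := p
    simp only [pvCoinFold, List.foldl_cons]
    by_cases h : c + a ≤ v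
    · rw [if_pos h, if_pos (by omega : (0:Int) + a ≤ v - c)]
      simp only [zero_add, List.nil_append]
      simp only [pvCoinFold] at ih
      rw [ih v (c + a) (s ++ [k]), ih (v - c) a [k], sub_add_eq_sub_sub]
      simp [add_assoc]
    · rw [if_neg h, if_neg (by omega : ¬ ((0:Int) + a ≤ v - c))]
      exact ih v c s

-- a pass takes every coin when they all fit
lemma coinFold_all (L : List (Int × Char)) : ∀ (v c : Int) (s : List Char),
    (∀ p ∈ L, 0 ≤ p.1) → c + (L.map Prod.fst).sum ≤ v →
    pvCoinFold L v (c, s) = (c + (L.map Prod.fst).sum, s ++ L.map Prod.snd) := by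
  induction L with
  | nil => intro v c s _ _; simp [pvCoinFold]
  | cons p L ih =>
    intro v c s hpos hle
    obtain ⟨a, k⟩ := p
    have hrest : 0 ≤ ((L.map Prod.fst).sum) := by
      apply List.sum_nonneg; intro x hx
      obtain ⟨q, hq, rfl⟩ := List.mem_map.mp hx
      exact hpos q (List.mem_cons_of_mem _ hq)
    simp only [List.map_cons, List.sum_cons] at hle ⊢
    simp only [pvCoinFold, List.foldl_cons]
    rw [if_pos (by omega : c + a ≤ v)]
    have := ih v (c + a) (s ++ [k]) (fun q hq => hpos q (List.mem_cons_of_mem _ hq)) (by omega)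
    simp only [pvCoinFold] at this
    rw [this]
    simp [add_assoc]

lemma pvG_full (r : Int) (h : 376 ≤ r) : pvCoinFold pvPairs r (0, ([] : List Char)) = (376, pvAllKeys) := by
  have := coinFold_all pvPairs r 0 [] (by decide) (by norm_num [pvPairs]; omega)
  simpa [pvPairs, pvAllKeys] using this

-- one greedy pass over the Fibonacci coins reaches any target 0 ≤ r < 376 exactly
set_option maxRecDepth 100000 in
lemma pvG_exact_fin : ∀ m : Fin 376, (pvCoinFold pvPairs ((m : Nat) : Int) (0, ([] : List Char))).1 = ((m : Nat) : Int) := by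
  decide

lemma pvG_exact (r : Int) (h0 : 0 ≤ r) (h1 : r < 376) :
    (pvCoinFold pvPairs r (0, ([] : List Char))).1 = r := by
  have h := pvG_exact_fin ⟨r.toNat, by omega⟩
  rwa [Int.toNat_of_nonneg h0] at h

-- each pass strictly increases current_count while current_count < value (A's while loop terminates)
lemma passA_inc (v c : Int) (s : List Char) (h : c < v) : c < (passA v c s).1 := by
  rw [passA_eq_coinFold, coinFold_shift]
  by_cases hr : 376 ≤ v - c
  · rw [pvG_full _ hr]; omega
  · rw [pvG_exact (v - c) (by omega) (by omega)]; omega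

-- A's 'while(current_count < value)' loop
def whileA (value current : Int) (word : List Char) : List Char :=
  if _h : current < value then
    let st := passA value current word
    whileA value st.1 st.2
  else word
termination_by (value - current).toNat
decreasing_by
  have := passA_inc value current word _h
  omega

def encpassA (password : String) : Int :=
  let cs := password.toList
  -- for p in range(len(password)): tot += ord(password[p]) * p   (index always in range)
  let tot : Int := (PySem.List.pyRange 0 (PySem.Str.len password) 1).foldl
    (fun tot p => tot + ((PySem.List.pyGetD cs p ' ').toNat : Int) * p) 0
  -- password[0] / password[-1] raise IndexError on an empty password — excluded by Pre_
  let tot := tot + ((PySem.List.pyGetD cs 0 ' ').toNat : Int) + ((PySem.List.pyGetD cs (-1) ' ').toNat : Int)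
  PySem.Int.mod tot 256

def encryptdb (dbcontent : String) (password : String) : String :=
  let db := dbcontent.toList.reverse          -- dbcontent[::-1]
  let key := encpassA password
  let st := db.foldl
    (fun (st : Int × List Char) cur =>
      let value : Int := (cur.toNat : Int) + key + PySem.Int.mod st.1 (PySem.Str.len password)
      (st.1 + 1, whileA value 0 st.2 ++ [':']))
    (1, [])
  String.mk st.2

-- ===== PORT B =====

def valuesB : List Int := [144, 89, 55, 34, 21, 13, 8, 5, 3, 2, 1, 1]

def keysB : String := "<~,.?-}[@*|/"

def pairsB : List (Int × Char) := valuesB.zip keysB.toList  -- list(zip(values, keys))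

def encpassB (password : String) : Int :=
  let cs := password.toList
  -- sum(i * ord(ch) for i, ch in enumerate(password))
  let tot : Int := ((PySem.List.enumerate cs 0).map (fun p => p.1 * (p.2.toNat : Int))).sum
  let tot := tot + ((PySem.List.pyGetD cs 0 ' ').toNat : Int) + ((PySem.List.pyGetD cs (-1) ' ').toNat : Int)
  PySem.Int.mod tot 256

def encryptdb_alt (dbcontent : String) (password : String) : String :=
  let key := encpassB password
  let n : Int := PySem.Str.len password
  -- for i, cur in enumerate(reversed(dbcontent)):
  let parts := (PySem.List.enumerate dbcontent.toList.reverse 0).foldl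
    (fun (acc : List Char) p =>
      let value : Int := (p.2.toNat : Int) + key + PySem.Int.mod (p.1 + 1) n
      let q := PySem.Int.floordiv value 376   -- q, r = divmod(value, 376)  (376 ≠ 0)
      let r := PySem.Int.mod value 376
      let piece := PySem.List.pyRepeat keysB.toList q    -- keys * q
      let piece := (pairsB.foldl
        (fun (st : Int × List Char) pr =>
          if st.1 + pr.1 ≤ r then (st.1 + pr.1, st.2 ++ [pr.2]) else st)
        (0, piece)).2
      acc ++ (piece ++ [':']))
    []
  String.mk parts

-- ===== PRECONDITION & SPEC =====
-- Pre_ excludes only the empty password, on which A raises (IndexError in encpass via password[0],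
-- and ZeroDivisionError in index % len(password)); B raises there too.
def Pre_encryptdb (dbcontent : String) (password : String) : Prop := password.toList ≠ []
instance (dbcontent : String) (password : String) : Decidable (Pre_encryptdb dbcontent password) := by
  unfold Pre_encryptdb; infer_instance

def pvWitness_encryptdb : String × String := ("ab", "pw")

def Spec_encryptdb (dbcontent : String) (password : String) (out : String) : Prop := out = encryptdb_alt dbcontent password
instance (dbcontent : String) (password : String) (out : String) : Decidable (Spec_encryptdb dbcontent password out) := by unfold Spec_encryptdb; infer_instance

-- ===== CLAIM (what is proved, stated in full; the proofs are below) =====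
def Claim_equal_encryptdb : Prop := ∀ (dbcontent : String) (password : String), Dom_encryptdb dbcontent password → Pre_encryptdb dbcontent password → Spec_encryptdb dbcontent password (encryptdb dbcontent password)

-- ===== LEMMAS AND PROOFS =====

-- what one character's while loop emits: value//376 full key cycles plus one exact greedy pass on value%376
def pvEmit (r : Int) : List Char :=
  PySem.List.pyRepeat pvAllKeys (PySem.Int.floordiv r 376)
    ++ (pvCoinFold pvPairs (PySem.Int.mod r 376) (0, [])).2

lemma pyRepeat_succ (xs : List Char) (k : Int) (hk : 0 ≤ k) :
    PySem.List.pyRepeat xs (k + 1) = xs ++ PySem.List.pyRepeat xs k := by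
  have h : (k + 1).toNat = k.toNat + 1 := by omega
  simp [PySem.List.pyRepeat, h, List.replicate_succ]

lemma whileA_stop (v c : Int) (s : List Char) (h : ¬ c < v) : whileA v c s = s := by
  rw [whileA, dif_neg h]

lemma whileA_char : ∀ (n : Nat) (v c : Int) (s : List Char), (v - c).toNat ≤ n → 0 < v - c →
    whileA v c s = s ++ pvEmit (v - c) := by
  intro n
  induction n with
  | zero => intro v c s hn hv; omega
  | succ n ih =>
    intro v c s hn hv
    have hfd : PySem.Int.floordiv (v - c) 376 = (v - c) / 376 := PySem.Int.floordiv_eq_ediv_of_pos (by norm_num)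
    have hmd : PySem.Int.mod (v - c) 376 = (v - c) % 376 := PySem.Int.mod_eq_emod_of_pos (by norm_num)
    rw [whileA, dif_pos (by omega : c < v)]
    rw [passA_eq_coinFold, coinFold_shift]
    by_cases hbig : 376 ≤ v - c
    · rw [pvG_full _ hbig]
      show whileA v (c + 376) (s ++ pvAllKeys) = s ++ pvEmit (v - c)
      by_cases heq : v - c = 376
      · -- one full pass reaches value exactly
        rw [whileA_stop _ _ _ (by omega)]
        rw [heq, (by decide : pvEmit 376 = pvAllKeys)]
      · have h1 : 0 < v - (c + 376) := by omega
        have h2 : (v - (c + 376)).toNat ≤ n := by omega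
        rw [ih v (c + 376) (s ++ pvAllKeys) h2 h1]
        have hr' : v - (c + 376) = (v - c) - 376 := by omega
        rw [hr']
        -- emit (v-c) = allKeys ++ emit ((v-c)-376)
        have hq0 : 0 ≤ (v - c) / 376 - 1 := by omega
        have hsplit : PySem.List.pyRepeat pvAllKeys ((v - c) / 376)
            = pvAllKeys ++ PySem.List.pyRepeat pvAllKeys ((v - c) / 376 - 1) := by
          have h376 : (v - c) / 376 = ((v - c) / 376 - 1) + 1 := by omega
          rw [h376, pyRepeat_succ _ _ hq0]; norm_num
        simp [pvEmit, hfd, hmd, hsplit]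
        congr 1
        omega
    · -- one exact remainder pass finishes the loop
      rw [pvG_exact (v - c) (by omega) (by omega)]
      show whileA v (c + (v - c)) (s ++ (pvCoinFold pvPairs (v - c) (0, [])).2) = s ++ pvEmit (v - c)
      rw [whileA_stop _ _ _ (by omega)]
      have hq : (v - c) / 376 = 0 := by omega
      have hm : (v - c) % 376 = v - c := by omega
      have hrep : PySem.List.pyRepeat pvAllKeys (0 : Int) = [] := by decide
      simp [pvEmit, hfd, hmd, hq, hm, hrep]

lemma whileA_run (v : Int) (h : 0 < v) (s : List Char) : whileA v 0 s = s ++ pvEmit v := by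
  have := whileA_char (v - 0).toNat v 0 s le_rfl (by omega)
  simpa using this

lemma encpass_eq (password : String) : encpassA password = encpassB password := by
  show PySem.Int.mod
      ((PySem.List.pyRange 0 (PySem.Str.len password) 1).foldl
        (fun tot p => tot + ((PySem.List.pyGetD password.toList p ' ').toNat : Int) * p) 0
      + ((PySem.List.pyGetD password.toList 0 ' ').toNat : Int)
      + ((PySem.List.pyGetD password.toList (-1) ' ').toNat : Int)) 256
    = PySem.Int.mod
      (((PySem.List.enumerate password.toList 0).map (fun p => p.1 * (p.2.toNat : Int))).sum
      + ((PySem.List.pyGetD password.toList 0 ' ').toNat : Int)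
      + ((PySem.List.pyGetD password.toList (-1) ' ').toNat : Int)) 256
  congr 2
  rw [PySem.List.foldl_add]
  rw [PySem.List.enumerate_eq_map_pyRange password.toList ' ']
  rw [List.map_map]
  simp only [PySem.Str.len_eq, PySem.List.len]
  rw [zero_add]
  congr 1
  congr 1
  apply List.map_congr_left
  intro x _
  simp [mul_comm]

-- what both loops produce over the whole (reversed) content
def pvCanon (key n : Int) (L : List Char) (j : Int) : List Char :=
  (PySem.List.enumerate L j).flatMap
    (fun p => pvEmit ((p.2.toNat : Int) + key + PySem.Int.mod (p.1 + 1) n) ++ [':'])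

lemma pvCanon_nil (key n : Int) (j : Int) : pvCanon key n [] j = [] := by
  simp [pvCanon, PySem.List.enumerate_nil]

lemma pvCanon_cons (key n : Int) (c : Char) (L : List Char) (j : Int) :
    pvCanon key n (c :: L) j
      = (pvEmit ((c.toNat : Int) + key + PySem.Int.mod (j + 1) n) ++ [':']) ++ pvCanon key n L (j + 1) := by
  simp [pvCanon, PySem.List.enumerate_cons]

lemma outerA (password : String) (key : Int) (hkey : 0 ≤ key) (hn : 1 ≤ PySem.Str.len password) :
    ∀ (L : List Char), (∀ c ∈ L, 1 ≤ (c.toNat : Int)) → ∀ (j : Int) (acc : List Char),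
    (L.foldl
      (fun (st : Int × List Char) cur =>
        ((st.1 + 1 : Int), whileA ((cur.toNat : Int) + key + PySem.Int.mod st.1 (PySem.Str.len password)) 0 st.2 ++ [':']))
      (j + 1, acc)).2
    = acc ++ pvCanon key (PySem.Str.len password) L j := by
  intro L
  induction L with
  | nil => intro _ j acc; simp [pvCanon_nil]
  | cons c L ih =>
    intro hL j acc
    rw [List.foldl_cons]
    simp only []
    have hv : 0 < (c.toNat : Int) + key + PySem.Int.mod (j + 1) (PySem.Str.len password) := by
      have h1 := hL c List.mem_cons_self
      have h2 : 0 ≤ PySem.Int.mod (j + 1) (PySem.Str.len password) :=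
        PySem.Int.mod_nonneg _ (by omega)
      omega
    rw [whileA_run _ hv acc]
    have := ih (fun x hx => hL x (List.mem_cons_of_mem _ hx)) (j + 1)
      (acc ++ pvEmit ((c.toNat : Int) + key + PySem.Int.mod (j + 1) (PySem.Str.len password)) ++ [':'])
    rw [this, pvCanon_cons]
    simp

lemma pieceB_eq (r0 : Int) (init : List Char) :
    (pairsB.foldl
      (fun (st : Int × List Char) pr =>
        if st.1 + pr.1 ≤ r0 then (st.1 + pr.1, st.2 ++ [pr.2]) else st)
      (0, init)).2
    = init ++ (pvCoinFold pvPairs r0 (0, [])).2 := by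
  have h1 : (pairsB.foldl
      (fun (st : Int × List Char) pr =>
        if st.1 + pr.1 ≤ r0 then (st.1 + pr.1, st.2 ++ [pr.2]) else st)
      (0, init)) = pvCoinFold pvPairs r0 (0, init) := rfl
  rw [h1, coinFold_shift, sub_zero]

lemma outerB (key n : Int) :
    ∀ (L : List Char) (j : Int) (acc : List Char),
    (PySem.List.enumerate L j).foldl
      (fun (acc : List Char) p =>
        acc ++ (((pairsB.foldl
          (fun (st : Int × List Char) pr =>
            if st.1 + pr.1 ≤ PySem.Int.mod ((p.2.toNat : Int) + key + PySem.Int.mod (p.1 + 1) n) 376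
            then (st.1 + pr.1, st.2 ++ [pr.2]) else st)
          (0, PySem.List.pyRepeat keysB.toList
            (PySem.Int.floordiv ((p.2.toNat : Int) + key + PySem.Int.mod (p.1 + 1) n) 376))).2) ++ [':']))
      acc
    = acc ++ pvCanon key n L j := by
  intro L
  induction L with
  | nil => intro j acc; simp [pvCanon_nil, PySem.List.enumerate_nil]
  | cons c L ih =>
    intro j acc
    rw [PySem.List.enumerate_cons, List.foldl_cons]
    simp only []
    rw [pieceB_eq]
    rw [ih (j + 1)]
    rw [pvCanon_cons]
    have hk : keysB.toList = pvAllKeys := rfl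
    simp [pvEmit, hk]

-- ===== VERDICT (by name: the statement is the Claim_ definition above) =====
theorem encryptdb_spec : Claim_equal_encryptdb := by
  intro db pw hdom hpre
  unfold Spec_encryptdb
  show encryptdb db pw = encryptdb_alt db pw
  have hn : 1 ≤ PySem.Str.len pw := by
    have h := hpre
    unfold Pre_encryptdb at h
    have : pw.toList.length ≠ 0 := fun h0 => h (List.eq_nil_of_length_eq_zero h0)
    simp only [PySem.Str.len_eq, PySem.List.len]
    omega
  have hkey : 0 ≤ encpassB pw := by
    unfold encpassB
    exact PySem.Int.mod_nonneg _ (by norm_num)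
  have hchars : ∀ c ∈ db.toList.reverse, 1 ≤ (c.toNat : Int) := by
    intro c hc
    unfold Dom_encryptdb at hdom
    have h1 : pvDomStr db = true := by
      rcases Bool.and_eq_true_iff.mp hdom with ⟨h1, _⟩; exact h1
    have h2 := (List.all_eq_true.mp h1) c (List.mem_reverse.mp hc)
    simp only [pvDomChar, Bool.or_eq_true, Bool.and_eq_true, decide_eq_true_eq, beq_iff_eq,
      Nat.le_iff_lt_or_eq] at h2
    omega
  unfold encryptdb encryptdb_alt
  simp only []
  rw [encpass_eq]
  refine congrArg String.mk ?_
  have hA := outerA pw (encpassB pw) hkey hn db.toList.reverse hchars 0 []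
  rw [show ((0:Int) + 1) = 1 from by norm_num] at hA
  simp only [List.nil_append] at hA
  rw [hA]
  have hB := outerB (encpassB pw) (PySem.Str.len pw) db.toList.reverse 0 []
  simp only [List.nil_append] at hB
  rw [hB]
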